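-- pv_equiv track=rewrite | github.com/circuitnet/CircuitNet | metrics.py | get_sorted_list
-- ===== SOURCE A (Python) =====
-- def get_sorted_list(fpr_sum_List,tpr_sum_List):
--     fpr_list = []
--     tpr_list = []
--     for i, j in zip(fpr_sum_List, tpr_sum_List):
--         if i not in fpr_list:
--             fpr_list.append(i)
--             tpr_list.append(j)
--
--     fpr_list.reverse()
--     tpr_list.reverse()
--     fpr_list, tpr_list = zip(*sorted(zip(fpr_list, tpr_list)))
--     return fpr_list, tpr_list
-- ===== SOURCE B (Python) =====
-- def get_sorted_list(fpr_sum_List, tpr_sum_List):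
--     # Stable-sort all pairs by fpr first, then one adjacent-dedup walk keeps the
--     # first pair of each equal-fpr run (= first occurrence in the input, by stability).
--     pairs = sorted(zip(fpr_sum_List, tpr_sum_List), key=lambda p: p[0])
--     kept = []
--     for p in pairs:
--         if not kept or kept[-1][0] != p[0]:
--             kept.append(p)
--     fpr_list, tpr_list = zip(*kept)
--     return fpr_list, tpr_list
-- ===== Notes on version B (the rewrite author's own statement) =====
-- stated objective: faster
-- what changed: A deduplicates first (repeated linear membership scans over the growing fpr accumulator) and then sorts; B reverses the strategy: it stably sorts all zipped pairs by fpr once and removes duplicates in a single adjacent-comparison walk over the sorted list, so no membership scan or seen-structure exists at all.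
import Mathlib
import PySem

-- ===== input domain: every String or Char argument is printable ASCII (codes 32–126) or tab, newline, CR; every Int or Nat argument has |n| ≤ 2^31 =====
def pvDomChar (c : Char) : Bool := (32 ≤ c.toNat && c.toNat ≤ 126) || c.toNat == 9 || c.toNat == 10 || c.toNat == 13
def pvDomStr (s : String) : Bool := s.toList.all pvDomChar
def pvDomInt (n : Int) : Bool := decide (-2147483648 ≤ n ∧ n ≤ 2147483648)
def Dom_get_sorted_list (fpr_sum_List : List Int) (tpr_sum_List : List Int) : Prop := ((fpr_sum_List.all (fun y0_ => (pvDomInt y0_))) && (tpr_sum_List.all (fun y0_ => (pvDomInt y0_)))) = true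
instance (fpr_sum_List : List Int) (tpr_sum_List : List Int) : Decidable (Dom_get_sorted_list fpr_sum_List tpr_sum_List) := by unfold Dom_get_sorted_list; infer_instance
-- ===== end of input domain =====

-- B replaces A's dedup-then-sort (repeated membership scans over the growing accumulator) by
-- one stable sort of the zipped pairs keyed on fpr followed by a single adjacent-dedup walk
-- (objective: faster).


-- ===== PORT A =====
def get_sorted_list (fpr_sum_List : List Int) (tpr_sum_List : List Int) : List Int × List Int :=
  -- the dedup loop: two parallel accumulator lists, membership test on the first
  let acc := (fpr_sum_List.zip tpr_sum_List).foldl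
    (fun (acc : List Int × List Int) ij =>
      if acc.1.contains ij.1 then acc else (acc.1 ++ [ij.1], acc.2 ++ [ij.2]))
    ([], [])
  let fpr_list := acc.1.reverse
  let tpr_list := acc.2.reverse
  -- sorted(zip(fpr_list, tpr_list)): Python's default tuple comparison is lexicographic
  let s := PySem.List.sorted2 (fpr_list.zip tpr_list) (fun p => p.1) (fun p => p.2)
  -- zip(*s): unzip into the two result tuples (Python raises ValueError when s is empty; Pre_ excludes that)
  (s.map Prod.fst, s.map Prod.snd)

-- ===== PORT B =====
def get_sorted_list_alt (fpr_sum_List : List Int) (tpr_sum_List : List Int) : List Int × List Int :=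
  -- stable sort of all zipped pairs, keyed on fpr alone
  let pairs := PySem.List.sorted (fpr_sum_List.zip tpr_sum_List) (fun p => p.1)
  -- one adjacent-dedup walk: keep a pair iff kept is empty or its fpr differs from the last kept fpr
  let kept := pairs.foldl
    (fun (kept : List (Int × Int)) p =>
      match kept.getLast? with
      | none => [p]
      | some q => if q.1 ≠ p.1 then kept ++ [p] else kept) []
  -- zip(*kept): unzip (raises ValueError when empty; Pre_ excludes that)
  (kept.map Prod.fst, kept.map Prod.snd)

-- ===== PRECONDITION & SPEC =====
-- Pre_ excludes exactly the inputs where zip(fpr, tpr) is empty: there Python A (and B) raises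
-- ValueError unpacking an empty sequence at 'zip(*...)'.
def Pre_get_sorted_list (fpr_sum_List : List Int) (tpr_sum_List : List Int) : Prop :=
  fpr_sum_List ≠ [] ∧ tpr_sum_List ≠ []
instance (fpr_sum_List : List Int) (tpr_sum_List : List Int) : Decidable (Pre_get_sorted_list fpr_sum_List tpr_sum_List) := by unfold Pre_get_sorted_list; infer_instance
def pvWitness_get_sorted_list : List Int × List Int := ([1, 3, 1], [5, 6, 7])

def Spec_get_sorted_list (fpr_sum_List : List Int) (tpr_sum_List : List Int) (out : List Int × List Int) : Prop := out = get_sorted_list_alt fpr_sum_List tpr_sum_List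
instance (fpr_sum_List : List Int) (tpr_sum_List : List Int) (out : List Int × List Int) : Decidable (Spec_get_sorted_list fpr_sum_List tpr_sum_List out) := by unfold Spec_get_sorted_list; infer_instance

-- ===== CLAIM (what is proved, stated in full; the proofs are below) =====
def Claim_equal_get_sorted_list : Prop := ∀ (fpr_sum_List : List Int) (tpr_sum_List : List Int), Dom_get_sorted_list fpr_sum_List tpr_sum_List → Pre_get_sorted_list fpr_sum_List tpr_sum_List → Spec_get_sorted_list fpr_sum_List tpr_sum_List (get_sorted_list fpr_sum_List tpr_sum_List)

-- ===== LEMMAS AND PROOFS =====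

-- A's loop step on the pair of parallel lists, and the same step carried on a list of pairs
def stepA (acc : List Int × List Int) (ij : Int × Int) : List Int × List Int :=
  if acc.1.contains ij.1 then acc else (acc.1 ++ [ij.1], acc.2 ++ [ij.2])
def stepP (kept : List (Int × Int)) (ij : Int × Int) : List (Int × Int) :=
  if (kept.map Prod.fst).contains ij.1 then kept else kept ++ [ij]
-- B's loop step
def stepK (kept : List (Int × Int)) (p : Int × Int) : List (Int × Int) :=
  match kept.getLast? with
  | none => [p]
  | some q => if q.1 ≠ p.1 then kept ++ [p] else kept
-- first-occurrence dedup with an explicit seen-key list (the recursion A's fold computes)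
def dedupK (seen : List Int) : List (Int × Int) → List (Int × Int)
  | [] => []
  | p :: l => if seen.contains p.1 then dedupK seen l else p :: dedupK (seen ++ [p.1]) l

-- A's two-list fold is the projection of the pair fold
lemma linkA : ∀ (ps pr : List (Int × Int)),
    ps.foldl stepA (pr.map Prod.fst, pr.map Prod.snd)
      = ((ps.foldl stepP pr).map Prod.fst, (ps.foldl stepP pr).map Prod.snd) := by
  intro ps
  induction ps with
  | nil => intro pr; simp
  | cons p ps ih =>
    intro pr
    by_cases h : ((pr.map Prod.fst).contains p.1 = true)
    · have hA : stepA (pr.map Prod.fst, pr.map Prod.snd) p = (pr.map Prod.fst, pr.map Prod.snd) := by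
        simp only [stepA]; rw [if_pos h]
      have hP : stepP pr p = pr := by simp only [stepP]; rw [if_pos h]
      rw [List.foldl_cons, List.foldl_cons, hA, hP]; exact ih pr
    · have hA : stepA (pr.map Prod.fst, pr.map Prod.snd) p
          = ((pr ++ [p]).map Prod.fst, (pr ++ [p]).map Prod.snd) := by
        simp only [stepA]; rw [if_neg h]; simp
      have hP : stepP pr p = pr ++ [p] := by simp only [stepP]; rw [if_neg h]
      rw [List.foldl_cons, List.foldl_cons, hA, hP]; exact ih (pr ++ [p])

-- the pair fold is first-occurrence dedup against the keys already kept
lemma foldP_dedupK : ∀ (ps pr : List (Int × Int)),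
    ps.foldl stepP pr = pr ++ dedupK (pr.map Prod.fst) ps := by
  intro ps
  induction ps with
  | nil => intro pr; simp [dedupK]
  | cons p ps ih =>
    intro pr
    by_cases h : ((pr.map Prod.fst).contains p.1 = true)
    · have hP : stepP pr p = pr := by simp only [stepP]; rw [if_pos h]
      rw [List.foldl_cons, hP, ih pr, dedupK, if_pos h]
    · have hP : stepP pr p = pr ++ [p] := by simp only [stepP]; rw [if_neg h]
      rw [List.foldl_cons, hP, ih (pr ++ [p]), dedupK, if_neg h]
      simp

-- membership in the dedup: exactly the first pair of each unseen key
lemma mem_dedupK : ∀ (l : List (Int × Int)) (seen : List Int) (x : Int × Int),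
    x ∈ dedupK seen l ↔ seen.contains x.1 = false ∧ l.find? (fun r => r.1 == x.1) = some x := by
  intro l
  induction l with
  | nil => intro seen x; simp [dedupK]
  | cons p l ih =>
    intro seen x
    by_cases h : (seen.contains p.1 = true)
    · rw [dedupK, if_pos h, ih]
      constructor
      · rintro ⟨h1, h2⟩
        refine ⟨h1, ?_⟩
        have hne : (p.1 == x.1) = false := by
          by_contra hc
          have : p.1 = x.1 := by
            cases hb : (p.1 == x.1) with
            | false => exact absurd hb hc
            | true => exact of_decide_eq_true hb
          rw [this] at h; rw [h] at h1; cases h1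
        rw [List.find?_cons_of_neg (by simp [hne])]
        exact h2
      · rintro ⟨h1, h2⟩
        refine ⟨h1, ?_⟩
        have hne : (p.1 == x.1) = false := by
          by_contra hc
          have : p.1 = x.1 := by
            cases hb : (p.1 == x.1) with
            | false => exact absurd hb hc
            | true => exact of_decide_eq_true hb
          rw [this] at h; rw [h] at h1; cases h1
        rw [List.find?_cons_of_neg (by simp [hne])] at h2
        exact h2
    · have h' : seen.contains p.1 = false := by
        cases hb : seen.contains p.1 with
        | false => rfl
        | true => exact absurd hb h
      rw [dedupK, if_neg h]
      constructor
      · intro hx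
        rcases List.mem_cons.mp hx with rfl | hx
        · exact ⟨h', by rw [List.find?_cons_of_pos (by simp)]⟩
        · rcases (ih _ x).mp hx with ⟨h1, h2⟩
          have hxs : seen.contains x.1 = false := by
            cases hb : seen.contains x.1 with
            | false => rfl
            | true =>
              have : x.1 ∈ seen ++ [p.1] := List.mem_append_left _ (List.contains_iff_mem.mp hb)
              rw [← List.contains_iff_mem] at this
              rw [this] at h1; cases h1
          have hxp : x.1 ≠ p.1 := by
            intro hc
            have : x.1 ∈ seen ++ [p.1] := List.mem_append_right _ (by simp [hc])
            rw [← List.contains_iff_mem] at this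
            rw [this] at h1; cases h1
          refine ⟨hxs, ?_⟩
          rw [List.find?_cons_of_neg (by simp; exact fun hc => hxp hc.symm)]
          exact h2
      · rintro ⟨h1, h2⟩
        by_cases hpx : p.1 = x.1
        · rw [List.find?_cons_of_pos (by simp [hpx])] at h2
          exact List.mem_cons.mpr (Or.inl (by injection h2 with h2; exact h2.symm))
        · rw [List.find?_cons_of_neg (by simp [hpx])] at h2
          refine List.mem_cons.mpr (Or.inr ((ih _ x).mpr ⟨?_, h2⟩))
          have : x.1 ∉ seen ++ [p.1] := by
            intro hc
            rcases List.mem_append.mp hc with hc | hc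
            · rw [← List.contains_iff_mem] at hc; rw [hc] at h1; cases h1
            · simp at hc; exact hpx hc.symm
          cases hb : (seen ++ [p.1]).contains x.1 with
          | false => rfl
          | true => exact absurd (List.contains_iff_mem.mp hb) this

-- the kept keys are pairwise distinct
lemma nodup_keys_dedupK : ∀ (l : List (Int × Int)) (seen : List Int),
    ((dedupK seen l).map Prod.fst).Nodup := by
  intro l
  induction l with
  | nil => intro seen; simp [dedupK]
  | cons p l ih =>
    intro seen
    by_cases h : (seen.contains p.1 = true)
    · rw [dedupK, if_pos h]; exact ih seen
    · rw [dedupK, if_neg h]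
      simp only [List.map_cons, List.nodup_cons]
      refine ⟨?_, ih (seen ++ [p.1])⟩
      intro hc
      rcases List.mem_map.mp hc with ⟨x, hx, hx1⟩
      rcases (mem_dedupK l (seen ++ [p.1]) x).mp hx with ⟨h1, _⟩
      have : x.1 ∈ seen ++ [p.1] := List.mem_append_right _ (by simp [hx1])
      rw [← List.contains_iff_mem] at this
      rw [this] at h1; cases h1

-- B's fold only inspects the last kept element, so a prefix factors out
lemma foldK_shift : ∀ (l acc : List (Int × Int)) (q : Int × Int),
    l.foldl stepK (acc ++ [q]) = acc ++ l.foldl stepK [q] := by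
  intro l
  induction l with
  | nil => intro acc q; rfl
  | cons p l ih =>
    intro acc q
    have hlast : (acc ++ [q]).getLast? = some q := by simp
    by_cases h : (q.1 ≠ p.1)
    · have h1 : stepK (acc ++ [q]) p = (acc ++ [q]) ++ [p] := by
        simp only [stepK, hlast]; rw [if_pos h]
      have h2 : stepK [q] p = [q] ++ [p] := by
        simp only [stepK, List.getLast?_singleton]; rw [if_pos h]
      rw [List.foldl_cons, List.foldl_cons, h1, h2]
      rw [ih (acc ++ [q]) p, ih [q] p, List.append_assoc]
    · have h1 : stepK (acc ++ [q]) p = acc ++ [q] := by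
        simp only [stepK, hlast]; rw [if_neg h]
      have h2 : stepK [q] p = [q] := by
        simp only [stepK, List.getLast?_singleton]; rw [if_neg h]
      rw [List.foldl_cons, List.foldl_cons, h1, h2]
      exact ih acc q

lemma foldK_cons (q p : Int × Int) (l : List (Int × Int)) :
    (p :: l).foldl stepK [q] = if q.1 ≠ p.1 then q :: l.foldl stepK [p] else l.foldl stepK [q] := by
  rw [List.foldl_cons]
  by_cases h : (q.1 ≠ p.1)
  · have h2 : stepK [q] p = [q] ++ [p] := by
      simp only [stepK, List.getLast?_singleton]; rw [if_pos h]
    rw [h2, foldK_shift l [q] p, if_pos h]; rfl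
  · have h2 : stepK [q] p = [q] := by
      simp only [stepK, List.getLast?_singleton]; rw [if_neg h]
    rw [h2, if_neg h]

-- on a key-sorted list, the walk keeps exactly the first pair of each key
lemma mem_foldK : ∀ (l : List (Int × Int)) (q : Int × Int),
    (q :: l).Pairwise (fun a b => a.1 ≤ b.1) →
    ∀ x, (x ∈ l.foldl stepK [q] ↔ (q :: l).find? (fun r => r.1 == x.1) = some x) := by
  intro l
  induction l with
  | nil =>
    intro q _ x
    simp only [List.foldl_nil, List.mem_singleton]
    constructor
    · rintro rfl; rw [List.find?_cons_of_pos (by simp)]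
    · intro h
      by_cases hpx : q.1 = x.1
      · rw [List.find?_cons_of_pos (by simp [hpx])] at h; injection h with h; exact h.symm
      · rw [List.find?_cons_of_neg (by simp [hpx])] at h; cases h
  | cons p l ih =>
    intro q hpw x
    have hql : q.1 ≤ p.1 := (List.pairwise_cons.mp hpw).1 p (by simp)
    have hpw' : (p :: l).Pairwise (fun a b => a.1 ≤ b.1) := (List.pairwise_cons.mp hpw).2
    rw [foldK_cons]
    by_cases h : (q.1 ≠ p.1)
    · rw [if_pos h]
      have hlt : q.1 < p.1 := lt_of_le_of_ne hql h
      constructor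
      · intro hx
        rcases List.mem_cons.mp hx with rfl | hx
        · rw [List.find?_cons_of_pos (by simp)]
        · have hfind := (ih p hpw' x).mp hx
          have hxmem : x ∈ p :: l := List.mem_of_find?_eq_some hfind
          have hxge : p.1 ≤ x.1 := by
            rcases List.mem_cons.mp hxmem with rfl | hx'
            · exact le_refl _
            · exact (List.pairwise_cons.mp hpw').1 x hx'
          have hqx : q.1 ≠ x.1 := by intro hc; rw [← hc] at hxge; exact absurd hlt (not_lt_of_ge hxge)
          rw [List.find?_cons_of_neg (by simp [hqx])]
          exact hfind
      · intro hfind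
        by_cases hqx : q.1 = x.1
        · rw [List.find?_cons_of_pos (by simp [hqx])] at hfind
          injection hfind with hfind
          exact List.mem_cons.mpr (Or.inl hfind.symm)
        · rw [List.find?_cons_of_neg (by simp [hqx])] at hfind
          exact List.mem_cons.mpr (Or.inr ((ih p hpw' x).mpr hfind))
    · rw [if_neg h]
      have hqp : q.1 = p.1 := not_not.mp h
      have hpwql : (q :: l).Pairwise (fun a b => a.1 ≤ b.1) := by
        rcases List.pairwise_cons.mp hpw with ⟨h1, h2⟩
        exact List.pairwise_cons.mpr ⟨fun y hy => h1 y (by simp [hy]), (List.pairwise_cons.mp h2).2⟩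
      rw [ih q hpwql x]
      have heq : List.find? (fun r : Int × Int => r.1 == x.1) (q :: l)
          = List.find? (fun r : Int × Int => r.1 == x.1) (q :: p :: l) := by
        by_cases hqx : q.1 = x.1
        · rw [List.find?_cons_of_pos (by simp [hqx]), List.find?_cons_of_pos (by simp [hqx])]
        · have hpx : ¬ p.1 = x.1 := by rw [← hqp]; exact hqx
          rw [List.find?_cons_of_neg (by simp [hqx]), List.find?_cons_of_neg (by simp [hqx]),
            List.find?_cons_of_neg (by simp [hpx])]
      rw [heq]

-- the walk's output is strictly increasing in the key
lemma pairwise_foldK : ∀ (l : List (Int × Int)) (q : Int × Int),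
    (q :: l).Pairwise (fun a b => a.1 ≤ b.1) →
    (l.foldl stepK [q]).Pairwise (fun a b => a.1 < b.1) := by
  intro l
  induction l with
  | nil => intro q _; simp
  | cons p l ih =>
    intro q hpw
    have hql : q.1 ≤ p.1 := (List.pairwise_cons.mp hpw).1 p (by simp)
    have hpw' : (p :: l).Pairwise (fun a b => a.1 ≤ b.1) := (List.pairwise_cons.mp hpw).2
    rw [foldK_cons]
    by_cases h : (q.1 ≠ p.1)
    · rw [if_pos h]
      have hlt : q.1 < p.1 := lt_of_le_of_ne hql h
      refine List.pairwise_cons.mpr ⟨?_, ih p hpw'⟩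
      intro y hy
      have hfind := (mem_foldK l p hpw' y).mp hy
      have hymem : y ∈ p :: l := List.mem_of_find?_eq_some hfind
      have : p.1 ≤ y.1 := by
        rcases List.mem_cons.mp hymem with rfl | hy'
        · exact le_refl _
        · exact (List.pairwise_cons.mp hpw').1 y hy'
      exact lt_of_lt_of_le hlt this
    · rw [if_neg h]
      have hpwql : (q :: l).Pairwise (fun a b => a.1 ≤ b.1) := by
        rcases List.pairwise_cons.mp hpw with ⟨h1, h2⟩
        exact List.pairwise_cons.mpr ⟨fun y hy => h1 y (by simp [hy]), (List.pairwise_cons.mp h2).2⟩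
      exact ih q hpwql

-- stable insertion keeps find?-by-key: inserting behaves like appending at the end
lemma insertBy_find? : ∀ (acc : List (Int × Int)) (x : Int × Int) (k : Int),
    acc.Pairwise (fun a b => a.1 ≤ b.1) →
    (PySem.List.insertBy (fun a b => decide (a.1 < b.1)) x acc).find? (fun r => r.1 == k)
      = (acc ++ [x]).find? (fun r => r.1 == k) := by
  intro acc
  induction acc with
  | nil => intro x k _; rfl
  | cons y ys ih =>
    intro x k hpw
    rw [PySem.List.insertBy.eq_2]
    by_cases h : (decide (x.1 < y.1) = true)
    · rw [if_pos h]
      have hxy : x.1 < y.1 := of_decide_eq_true h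
      by_cases hxk : x.1 = k
      · have hnone : (y :: ys).find? (fun r => r.1 == k) = none := by
          rw [List.find?_eq_none]
          intro r hr
          have : y.1 ≤ r.1 := by
            rcases List.mem_cons.mp hr with rfl | hr'
            · exact le_refl _
            · exact (List.pairwise_cons.mp hpw).1 r hr'
          have : k < r.1 := lt_of_lt_of_le (hxk ▸ hxy) this
          simp; omega
        rw [List.find?_cons_of_pos (by simp [hxk]), List.find?_append, hnone]
        simp [hxk]
      · rw [List.find?_cons_of_neg (by simp [hxk]), List.find?_append]
        have h2 : [x].find? (fun r => r.1 == k) = none := by simp [hxk]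
        rw [h2, Option.or_none]
    · rw [if_neg h]
      by_cases hyk : y.1 = k
      · rw [List.find?_cons_of_pos (by simp [hyk])]
        rw [List.cons_append, List.find?_cons_of_pos (by simp [hyk])]
      · rw [List.find?_cons_of_neg (by simp [hyk])]
        rw [List.cons_append, List.find?_cons_of_neg (by simp [hyk])]
        exact ih x k (List.pairwise_cons.mp hpw).2

-- insertion preserves key-sortedness of the accumulator
lemma insertBy_pairwise_le : ∀ (acc : List (Int × Int)) (x : Int × Int),
    acc.Pairwise (fun a b => a.1 ≤ b.1) →
    (PySem.List.insertBy (fun a b => decide (a.1 < b.1)) x acc).Pairwise (fun a b => a.1 ≤ b.1) := by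
  intro acc
  induction acc with
  | nil => intro x _; simp [PySem.List.insertBy]
  | cons y ys ih =>
    intro x hpw
    rw [PySem.List.insertBy.eq_2]
    by_cases h : (decide (x.1 < y.1) = true)
    · rw [if_pos h]
      have hxy : x.1 < y.1 := of_decide_eq_true h
      refine List.pairwise_cons.mpr ⟨?_, hpw⟩
      intro z hz
      rcases List.mem_cons.mp hz with rfl | hz'
      · exact le_of_lt hxy
      · exact le_trans (le_of_lt hxy) ((List.pairwise_cons.mp hpw).1 z hz')
    · rw [if_neg h]
      have hyx : y.1 ≤ x.1 := le_of_not_gt (fun hc => h (decide_eq_true hc))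
      refine List.pairwise_cons.mpr ⟨?_, ih x (List.pairwise_cons.mp hpw).2⟩
      intro z hz
      rcases (PySem.List.mem_insertBy _ _ _ _).mp hz with rfl | hz'
      · exact hyx
      · exact (List.pairwise_cons.mp hpw).1 z hz'

-- the stable sort preserves the first pair found for every key (stability)
lemma sorted_find? (L : List (Int × Int)) (k : Int) :
    (PySem.List.sorted L (fun p => p.1)).find? (fun r => r.1 == k)
      = L.find? (fun r => r.1 == k) := by
  rw [PySem.List.sorted_eq_foldl_insertBy]
  suffices h : ∀ (l acc : List (Int × Int)), acc.Pairwise (fun a b => a.1 ≤ b.1) →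
      (l.foldl (fun a x => PySem.List.insertBy (fun a b => decide (a.1 < b.1)) x a) acc).find?
        (fun r => r.1 == k) = (acc ++ l).find? (fun r => r.1 == k) by
    have := h L [] (by simp)
    simpa using this
  intro l
  induction l with
  | nil => intro acc _; simp
  | cons x l ih =>
    intro acc hpw
    rw [List.foldl_cons, ih _ (insertBy_pairwise_le acc x hpw), List.find?_append,
      insertBy_find? acc x k hpw, ← List.find?_append, List.append_assoc, List.singleton_append]

-- insertBy only looks at 'before x y' for y in the list
lemma insertBy_congr {α : Type} (b b' : α → α → Bool) (x : α) :
    ∀ (ys : List α), (∀ y ∈ ys, b x y = b' x y) →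
      PySem.List.insertBy b x ys = PySem.List.insertBy b' x ys := by
  intro ys
  induction ys with
  | nil => intro _; rfl
  | cons y ys ih =>
    intro h
    rw [PySem.List.insertBy.eq_2, PySem.List.insertBy.eq_2, h y (by simp)]
    split
    · rfl
    · rw [ih (fun z hz => h z (by simp [hz]))]

-- an insertion-sort fold is unchanged when the comparators agree on the elements involved
lemma foldl_insertBy_congr {α : Type} (b b' : α → α → Bool) :
    ∀ (xs acc : List α), (∀ x ∈ xs, ∀ y, (y ∈ acc ∨ y ∈ xs) → b x y = b' x y) →
      xs.foldl (fun a x => PySem.List.insertBy b x a) acc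
        = xs.foldl (fun a x => PySem.List.insertBy b' x a) acc := by
  intro xs
  induction xs with
  | nil => intro acc _; rfl
  | cons x xs ih =>
    intro acc h
    have hx : PySem.List.insertBy b x acc = PySem.List.insertBy b' x acc :=
      insertBy_congr b b' x acc (fun y hy => h x (by simp) y (Or.inl hy))
    rw [List.foldl_cons, List.foldl_cons, hx]
    refine ih (PySem.List.insertBy b' x acc) ?_
    intro z hz y hy
    refine h z (by simp [hz]) y ?_
    rcases hy with hy | hy
    · rcases (PySem.List.mem_insertBy _ _ _ _).mp hy with hy | hy
      · exact Or.inr (by simp [hy])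
      · exact Or.inl hy
    · exact Or.inr (by simp [hy])

-- on a pair list whose fprs are injective, the lexicographic sort is the fpr-keyed sort
lemma sorted2_eq_sorted_fst (L : List (Int × Int))
    (h : ∀ a ∈ L, ∀ b ∈ L, a.1 = b.1 → a = b) :
    PySem.List.sorted2 L (fun p => p.1) (fun p => p.2) = PySem.List.sorted L (fun p => p.1) := by
  rw [PySem.List.sorted_eq_foldl_insertBy]
  show L.foldl (fun acc x => PySem.List.insertBy _ x acc) [] = _
  refine foldl_insertBy_congr _ _ L [] ?_
  intro x hx y hy
  rcases hy with hy | hy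
  · simp at hy
  · by_cases hxy : x.1 = y.1
    · have := h x hx y hy hxy
      subst this
      simp
    · rcases lt_trichotomy x.1 y.1 with hlt | heq | hgt
      · simp [hlt]
      · exact absurd heq hxy
      · have h1 : ¬ x.1 < y.1 := not_lt_of_gt hgt
        simp [h1, hgt]

-- sorting any rearrangement of L by fpr gives the same list, when fprs are pairwise distinct
lemma sorted_fst_reverse (L : List (Int × Int)) (hnd : (L.map Prod.fst).Nodup) :
    PySem.List.sorted L.reverse (fun p => p.1) = PySem.List.sorted L (fun p => p.1) := by
  refine PySem.List.sorted_eq_of_perm_of_pairwise_lt _ _ _ ?_ ?_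
  · exact (PySem.List.sorted_perm L (fun p => p.1) false).trans (List.reverse_perm L).symm
  · have hle := PySem.List.sorted_pairwise L (fun p => p.1)
    have hperm : (PySem.List.sorted L (fun p => p.1)).Perm L :=
      PySem.List.sorted_perm L (fun p => p.1) false
    have hnd' : ((PySem.List.sorted L (fun p => p.1)).map Prod.fst).Nodup :=
      (hperm.map Prod.fst).nodup_iff.mpr hnd
    have hne : (PySem.List.sorted L (fun p => p.1)).Pairwise (fun a b => a.1 ≠ b.1) :=
      (List.pairwise_map).mp hnd'
    exact (hle.and hne).imp (fun h => lt_of_le_of_ne h.1 h.2)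

-- ===== VERDICT (by name: the statement is the Claim_ definition above) =====
theorem get_sorted_list_spec : Claim_equal_get_sorted_list := by
  intro f t _ hpre
  show get_sorted_list f t = get_sorted_list_alt f t
  unfold get_sorted_list get_sorted_list_alt
  -- names for the shared data
  set L := f.zip t with hLdef
  have hLne : L ≠ [] := by
    rcases hpre with ⟨hf, ht⟩
    cases f with
    | nil => exact absurd rfl hf
    | cons a f' =>
      cases t with
      | nil => exact absurd rfl ht
      | cons b t' => simp [hLdef]
  -- A's fold computes the first-occurrence dedup D
  have hA : L.foldl
      (fun (acc : List Int × List Int) ij =>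
        if acc.1.contains ij.1 then acc else (acc.1 ++ [ij.1], acc.2 ++ [ij.2])) ([], [])
      = ((dedupK [] L).map Prod.fst, (dedupK [] L).map Prod.snd) := by
    have h1 := linkA L []
    have h2 := foldP_dedupK L []
    simp only [List.map_nil] at h1 h2
    rw [List.nil_append] at h2
    calc L.foldl _ ([], []) = L.foldl stepA ([], []) := rfl
      _ = ((L.foldl stepP []).map Prod.fst, (L.foldl stepP []).map Prod.snd) := h1
      _ = ((dedupK [] L).map Prod.fst, (dedupK [] L).map Prod.snd) := by rw [h2]
  rw [hA]
  set D := dedupK [] L with hDdef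
  have hndD : (D.map Prod.fst).Nodup := nodup_keys_dedupK L []
  -- A's zip of the two reversed lists is D.reverse
  have hzip : ((D.map Prod.fst).reverse.zip (D.map Prod.snd).reverse) = D.reverse := by
    rw [← List.map_reverse, ← List.map_reverse, List.zip_map']
    simp
  simp only [hzip]
  -- A's lexicographic sort is the fpr-keyed sort of D
  have hndDrev : (D.reverse.map Prod.fst).Nodup := by
    rw [List.map_reverse, List.nodup_reverse]
    exact hndD
  rw [sorted2_eq_sorted_fst D.reverse
    (fun a ha b hb hab => List.inj_on_of_nodup_map hndDrev ha hb hab),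
    sorted_fst_reverse D hndD]
  -- B's fold: S = sorted L, kept = adjacent dedup
  set S := PySem.List.sorted L (fun p => p.1) with hSdef
  have hSne : S ≠ [] := by
    intro hc
    exact hLne ((PySem.List.sorted_eq_nil_iff _ _ _).mp hc)
  obtain ⟨q, l, hS⟩ : ∃ q l, S = q :: l := by
    cases hSq : S with
    | nil => exact absurd hSq hSne
    | cons q l => exact ⟨q, l, rfl⟩
  have hB : S.foldl
      (fun (kept : List (Int × Int)) p =>
        match kept.getLast? with
        | none => [p]
        | some q => if q.1 ≠ p.1 then kept ++ [p] else kept) []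
      = l.foldl stepK [q] := by
    rw [hS, List.foldl_cons]
    rfl
  rw [hB]
  set K := l.foldl stepK [q] with hKdef
  have hSpw : (q :: l).Pairwise (fun a b => a.1 ≤ b.1) := by
    have := PySem.List.sorted_pairwise L (fun p => p.1)
    rw [← hSdef, hS] at this
    exact this
  -- K is strictly key-increasing
  have hKlt : K.Pairwise (fun a b => a.1 < b.1) := pairwise_foldK l q hSpw
  -- membership: both K and D are exactly the first pair of each key of L
  have hmem : ∀ x, x ∈ K ↔ x ∈ D := by
    intro x
    rw [hKdef, mem_foldK l q hSpw x, hDdef, mem_dedupK L [] x]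
    have : (q :: l).find? (fun r => r.1 == x.1) = L.find? (fun r => r.1 == x.1) := by
      rw [← hS, hSdef]
      exact sorted_find? L x.1
    rw [this]
    simp
  -- hence K ~ D, so the fpr-keyed sort of D is K
  have hndK : K.Nodup := List.Pairwise.imp (fun h => by intro hc; rw [hc] at h; exact lt_irrefl _ h) hKlt
  have hndDl : D.Nodup := hndD.of_map
  have hperm : K.Perm D := by
    apply List.perm_of_nodup_nodup_toFinset_eq hndK hndDl
    ext x
    simp [List.mem_toFinset, hmem x]
  rw [PySem.List.sorted_eq_of_perm_of_pairwise_lt D K (fun p => p.1) hperm hKlt]
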